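-- pv_equiv track=rewrite | github.com/toastonastick/misc | foobar2_2.py | answer4
-- ===== SOURCE A (Python) =====
-- def answer4(names):
--
--     score_table = dict(zip('abcdefghijklmnopqrstuvwxyz', range(1,27)))
--
--     word_tuplist = []
--
--     for name in names:      # build (word, score) tuple from list of names and score table
--         word_score = 0
--         for chr in name:
--             word_score += score_table[chr]
--         word_tuplist.append((name, word_score))
--
--
--     for insert_pass in range(1,len(word_tuplist)):
--         left = insert_pass
--         while (left > 0):
--             if word_tuplist[left][1] >= word_tuplist[left-1][1]:
--                 if word_tuplist[left][1] > word_tuplist[left-1][1]: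
--                     word_tuplist[left], word_tuplist[left-1] = word_tuplist[left-1], word_tuplist[left]
--
--                 else:
--                     if word_tuplist[left][0] > word_tuplist[left-1][0]:
--                         word_tuplist[left], word_tuplist[left-1] = word_tuplist[left-1], word_tuplist[left]
--                 left -= 1
--             else:
--                 break
--
--     return [tup[0] for tup in word_tuplist]
-- ===== SOURCE B (Python) =====
-- def answer4(names):
--     score_table = dict(zip('abcdefghijklmnopqrstuvwxyz', range(1, 27)))
--     return sorted(names,
--                   key=lambda name: (sum(score_table[c] for c in name), name),
--                   reverse=True)
-- ===== Notes on version B (the rewrite author's own statement) =====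
-- stated objective: idiomatic
-- what changed: A's hand-written quadratic insertion sort over explicitly built (name, score) tuples with index swaps is replaced by a single sorted(names, key=lambda name: (score, name), reverse=True) call, computing each score inside the key function.
import Mathlib
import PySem

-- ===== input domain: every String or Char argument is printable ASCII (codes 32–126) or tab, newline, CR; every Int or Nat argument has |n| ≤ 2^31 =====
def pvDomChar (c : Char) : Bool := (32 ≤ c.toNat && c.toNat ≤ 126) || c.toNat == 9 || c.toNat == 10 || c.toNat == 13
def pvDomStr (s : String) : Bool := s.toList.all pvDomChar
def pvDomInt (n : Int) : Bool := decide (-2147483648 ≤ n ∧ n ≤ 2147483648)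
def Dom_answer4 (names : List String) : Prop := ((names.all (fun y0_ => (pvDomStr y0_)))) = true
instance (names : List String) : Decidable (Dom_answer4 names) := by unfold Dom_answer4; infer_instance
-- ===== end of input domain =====

-- B replaces A's hand-written quadratic insertion sort over (name, score) tuples by a single
-- library sorted() call keyed by (score, name) with reverse=True; the equivalence of return
-- values is proved on Pre_ (all-lowercase names, exactly where A does not raise KeyError).

-- ===== PORT A =====
-- score_table = dict(zip('abcdefghijklmnopqrstuvwxyz', range(1,27)))
def pvTable : PySem.Dict Char Int :=
  PySem.Dict.ofList (List.zip "abcdefghijklmnopqrstuvwxyz".toList (PySem.List.pyRange 1 27))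

-- the inner character loop accumulating word_score; score_table[chr] raises KeyError on a
-- character outside 'a'..'z' — those inputs are excluded by Pre_, so getD 0 is exact on Pre_.
def pvScore (table : PySem.Dict Char Int) (name : String) : Int :=
  name.toList.foldl (fun s c => s + PySem.Dict.getD table c 0) 0

-- word_tuplist[left], word_tuplist[left-1] = word_tuplist[left-1], word_tuplist[left]
-- (indices are in range on every call A makes, so getD's default is never read)
def pvSwap (arr : List (String × Int)) (left : Nat) : List (String × Int) :=
  (arr.set left (arr.getD (left - 1) ("", 0))).set (left - 1) (arr.getD left ("", 0))

-- the while-loop of one insertion pass, recursion on left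
def pvInner : List (String × Int) → Nat → List (String × Int)
  | arr, 0 => arr
  | arr, l + 1 =>
    let cur := arr.getD (l + 1) ("", 0)
    let prev := arr.getD l ("", 0)
    if prev.2 ≤ cur.2 then
      if prev.2 < cur.2 then pvInner (pvSwap arr (l + 1)) l
      else if prev.1 < cur.1 then pvInner (pvSwap arr (l + 1)) l
      else pvInner arr l
    else arr

def answer4 (names : List String) : List String :=
  let score_table := pvTable
  let word_tuplist :=
    names.foldl (fun acc name => acc ++ [(name, pvScore score_table name)]) []
  let sorted :=
    (PySem.List.pyRange 1 (word_tuplist.length : Int)).foldl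
      (fun arr insert_pass => pvInner arr insert_pass.toNat) word_tuplist
  sorted.map (fun tup => tup.1)

-- ===== PORT B =====
def answer4_alt (names : List String) : List String :=
  let score_table := pvTable
  PySem.List.sorted2 names (fun name => pvScore score_table name) (fun name => name) true

-- ===== PRECONDITION & SPEC =====
-- Pre_ excludes exactly the inputs containing a character outside 'a'..'z', on which A's
-- score_table[chr] raises KeyError (B's key function raises the same KeyError there).
def Pre_answer4 (names : List String) : Prop :=
  (names.all (fun n => n.toList.all (fun c => 'a' ≤ c && c ≤ 'z'))) = true
instance (names : List String) : Decidable (Pre_answer4 names) := by unfold Pre_answer4; infer_instance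

def pvWitness_answer4 : List String := ["abc", "ab", "zz", "ab", ""]

def Spec_answer4 (names : List String) (out : List String) : Prop := out = answer4_alt names
instance (names : List String) (out : List String) : Decidable (Spec_answer4 names out) := by unfold Spec_answer4; infer_instance

-- ===== CLAIM (what is proved, stated in full; the proofs are below) =====
def Claim_equal_answer4 : Prop := ∀ (names : List String), Dom_answer4 names → Pre_answer4 names → Spec_answer4 names (answer4 names)

-- ===== LEMMAS AND PROOFS =====

-- the comparator A's swap rule implements on tuples: pvBf u v = true ↔ (v.2, v.1) <lex (u.2, u.1)
def pvBf (u v : String × Int) : Bool :=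
  decide (v.2 < u.2) || (!decide (u.2 < v.2) && decide (v.1 < u.1))

def pvKey (t : String × Int) : Lex (Int × String) := toLex (t.2, t.1)

theorem pvBf_true_iff (u v : String × Int) : pvBf u v = true ↔ pvKey v < pvKey u := by
  simp only [pvBf, pvKey, Prod.Lex.lt_iff, Bool.or_eq_true, Bool.and_eq_true, Bool.not_eq_true',
    decide_eq_true_eq, decide_eq_false_iff_not]
  constructor
  · rintro (h | ⟨h1, h2⟩)
    · exact Or.inl h
    · rcases lt_trichotomy v.2 u.2 with h' | h' | h'
      · exact Or.inl h'
      · exact Or.inr ⟨h', h2⟩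
      · exact absurd h' h1
  · rintro (h | ⟨h1, h2⟩)
    · exact Or.inl h
    · have h1' : v.2 = u.2 := h1
      exact Or.inr ⟨h1' ▸ lt_irrefl _, h2⟩

theorem pvBf_false_iff (u v : String × Int) : pvBf u v = false ↔ pvKey u ≤ pvKey v := by
  rw [← not_iff_not]
  simp only [← ne_eq, Bool.not_eq_false, pvBf_true_iff, not_le]

theorem length_insertBy (bf : (String × Int) → (String × Int) → Bool) (x : String × Int)
    (ys : List (String × Int)) : (PySem.List.insertBy bf x ys).length = ys.length + 1 := by
  induction ys with
  | nil => rfl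
  | cons y ys ih => simp only [PySem.List.insertBy]; split <;> simp [ih]

-- the descending order relation maintained by A's sorted prefix
def pvR (a b : String × Int) : Prop := pvBf b a = false

theorem pairwise_insertBy (x : String × Int) (ys : List (String × Int))
    (h : ys.Pairwise pvR) : (PySem.List.insertBy pvBf x ys).Pairwise pvR := by
  induction ys with
  | nil => simp [PySem.List.insertBy]
  | cons y ys ih =>
    rcases List.pairwise_cons.1 h with ⟨hy, hys⟩
    simp only [PySem.List.insertBy]
    split
    · rename_i hb
      refine List.pairwise_cons.2 ⟨?_, h⟩
      intro z hz
      rcases List.mem_cons.1 hz with rfl | hz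
      · exact (pvBf_false_iff _ _).2 (le_of_lt ((pvBf_true_iff _ _).1 hb))
      · have hzc : pvKey z ≤ pvKey y := (pvBf_false_iff _ _).1 (hy z hz)
        exact (pvBf_false_iff _ _).2 (le_of_lt (lt_of_le_of_lt hzc ((pvBf_true_iff _ _).1 hb)))
    · rename_i hb
      refine List.pairwise_cons.2 ⟨?_, ih hys⟩
      intro z hz
      rcases (PySem.List.mem_insertBy _ _ _ _).1 hz with rfl | hz
      · exact Bool.eq_false_iff.2 (fun hc => hb (by simp [hc]))
      · exact hy z hz

theorem getD_append_left {α : Type} (l r : List α) (i : Nat) (d : α) (h : i < l.length) :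
    (l ++ r).getD i d = l.getD i d := by
  simp [List.getD, List.getElem?_append_left h]

theorem getD_append_length {α : Type} (l : List α) (a : α) (t : List α) (d : α) :
    (l ++ a :: t).getD l.length d = a := by
  simp [List.getD]

theorem pvSwap_append (ys : List (String × Int)) (y x : String × Int) (rest : List (String × Int)) :
    pvSwap (ys ++ y :: x :: rest) (ys.length + 1) = ys ++ x :: y :: rest := by
  induction ys with
  | nil => simp [pvSwap]
  | cons a ys ih =>
    simp only [pvSwap, List.cons_append, List.length_cons, List.getD_cons_succ,
      List.set_cons_succ] at *
    simpa using ih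

theorem insertBy_append_singleton (x y : String × Int) (ys : List (String × Int))
    (h : pvBf x y = true) :
    PySem.List.insertBy pvBf x (ys ++ [y]) = PySem.List.insertBy pvBf x ys ++ [y] := by
  induction ys with
  | nil => simp [PySem.List.insertBy, h]
  | cons a ys ih =>
    simp only [List.cons_append, PySem.List.insertBy]
    split <;> simp [ih]

theorem pvLe_cases (u v : String × Int) (h : pvKey u ≤ pvKey v) :
    u.2 < v.2 ∨ (u.2 = v.2 ∧ u.1 ≤ v.1) := by
  simpa [pvKey, Prod.Lex.le_iff] using h

theorem pvLt_cases (u v : String × Int) (h : pvKey u < pvKey v) :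
    u.2 < v.2 ∨ (u.2 = v.2 ∧ u.1 < v.1) := by
  simpa [pvKey, Prod.Lex.lt_iff] using h

theorem pvInner_noop (zs rest : List (String × Int)) (h : zs.Pairwise pvR) :
    ∀ j, j < zs.length → pvInner (zs ++ rest) j = zs ++ rest := by
  intro j
  induction j with
  | zero => intro _; rfl
  | succ l ih =>
    intro hj
    have hl : l < zs.length := Nat.lt_of_succ_lt hj
    have hcur : (zs ++ rest).getD (l + 1) ("", 0) = zs[l + 1]'hj := by
      rw [getD_append_left _ _ _ _ hj, List.getD_eq_getElem _ _ hj]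
    have hprev : (zs ++ rest).getD l ("", 0) = zs[l]'hl := by
      rw [getD_append_left _ _ _ _ hl, List.getD_eq_getElem _ _ hl]
    have hR : pvR (zs[l]'hl) (zs[l + 1]'hj) :=
      List.pairwise_iff_getElem.1 h l (l + 1) hl hj (Nat.lt_succ_self l)
    have hle := pvLe_cases _ _ ((pvBf_false_iff _ _).1 hR)
    simp only [pvInner, hcur, hprev]
    rcases hle with hlt | ⟨heq, hnm⟩
    · rw [if_neg (by omega)]
    · rw [if_pos (by omega), if_neg (by omega), if_neg (by exact fun hc => absurd hnm hc.not_ge)]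
      exact ih hl

theorem pvInner_spec (ys : List (String × Int)) (x : String × Int) (rest : List (String × Int))
    (h : ys.Pairwise pvR) :
    pvInner (ys ++ x :: rest) ys.length = PySem.List.insertBy pvBf x ys ++ rest := by
  induction ys using List.reverseRecOn generalizing rest with
  | nil => simp [pvInner, PySem.List.insertBy]
  | append_singleton ys' y ih =>
    rcases List.pairwise_append.1 h with ⟨hys', _, hcross⟩
    have hRy : ∀ e ∈ ys', pvBf y e = false := fun e he => hcross e he y (List.mem_singleton_self y)
    have harr : (ys' ++ [y]) ++ x :: rest = ys' ++ y :: x :: rest := by simp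
    have hlen : (ys' ++ [y]).length = ys'.length + 1 := by simp
    have hcur : (ys' ++ y :: x :: rest).getD (ys'.length + 1) ("", 0) = x := by
      rw [← harr, ← hlen]
      exact getD_append_length (ys' ++ [y]) x rest ("", 0)
    have hprev : (ys' ++ y :: x :: rest).getD ys'.length ("", 0) = y :=
      getD_append_length ys' y (x :: rest) ("", 0)
    rw [harr, hlen]
    cases hb : pvBf x y with
    | true =>
      have hlt := pvLt_cases _ _ ((pvBf_true_iff _ _).1 hb)
      have step : pvInner (ys' ++ y :: x :: rest) (ys'.length + 1)
          = pvInner (ys' ++ x :: y :: rest) ys'.length := by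
        simp only [pvInner, hcur, hprev]
        rcases hlt with hlt | ⟨heq, hnm⟩
        · rw [if_pos (by omega), if_pos (by omega), pvSwap_append]
        · rw [if_pos (by omega), if_neg (by omega), if_pos hnm, pvSwap_append]
      rw [step, ih (y :: rest) hys', insertBy_append_singleton _ _ _ hb]
      simp
    | false =>
      have hnb : ∀ e ∈ ys' ++ [y], pvBf x e = false := by
        intro e he
        rcases List.mem_append.1 he with he | he
        · have h1 : pvKey x ≤ pvKey y := (pvBf_false_iff _ _).1 hb
          have h2 : pvKey y ≤ pvKey e := (pvBf_false_iff _ _).1 (hRy e he)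
          exact (pvBf_false_iff _ _).2 (le_trans h1 h2)
        · simpa [List.eq_of_mem_singleton he] using hb
      have hrhs : PySem.List.insertBy pvBf x (ys' ++ [y]) = (ys' ++ [y]) ++ [x] :=
        PySem.List.insertBy_of_forall_not_before _ _ _ hnb
      have hle := pvLe_cases _ _ ((pvBf_false_iff _ _).1 hb)
      rcases hle with hlt | ⟨heq, hnm⟩
      · have step : pvInner (ys' ++ y :: x :: rest) (ys'.length + 1) = ys' ++ y :: x :: rest := by
          simp only [pvInner, hcur, hprev]
          rw [if_neg (by omega)]
        rw [step, hrhs]; simp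
      · have step : pvInner (ys' ++ y :: x :: rest) (ys'.length + 1)
            = pvInner ((ys' ++ [y]) ++ x :: rest) ys'.length := by
          simp only [pvInner, hcur, hprev]
          rw [if_pos (by omega), if_neg (by omega), if_neg (by exact fun hc => absurd hnm hc.not_ge)]
          rw [harr]
        rw [step, pvInner_noop (ys' ++ [y]) (x :: rest) h ys'.length (by simp), hrhs]
        simp

theorem pairwise_foldl_insertBy (xs acc : List (String × Int)) (h : acc.Pairwise pvR) :
    (xs.foldl (fun a t => PySem.List.insertBy pvBf t a) acc).Pairwise pvR := by
  induction xs generalizing acc with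
  | nil => exact h
  | cons t ts ih => exact ih _ (pairwise_insertBy t acc h)

theorem length_foldl_insertBy (xs acc : List (String × Int)) :
    (xs.foldl (fun a t => PySem.List.insertBy pvBf t a) acc).length = acc.length + xs.length := by
  induction xs generalizing acc with
  | nil => simp
  | cons t ts ih => simp [ih, length_insertBy]; omega

theorem pvOuter (wt : List (String × Int)) (k : Nat) (hk : 1 ≤ k) (hk2 : k ≤ wt.length) :
    (PySem.List.pyRange 1 (k : Int)).foldl (fun arr ip => pvInner arr ip.toNat) wt
      = ((wt.take k).foldl (fun a t => PySem.List.insertBy pvBf t a) []) ++ wt.drop k := by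
  induction k with
  | zero => omega
  | succ k ih =>
    rcases Nat.eq_or_lt_of_le hk with h1 | h1
    · have hk0 : k = 0 := by omega
      subst hk0
      rcases wt with _ | ⟨w, wt'⟩
      · simp at hk2
      · simp [PySem.List.insertBy]
    · have hk1 : 1 ≤ k := by omega
      have hklen : k < wt.length := by omega
      have hr : PySem.List.pyRange 1 ((k : Int) + 1) = PySem.List.pyRange 1 (k : Int) ++ [(k : Int)] :=
        PySem.List.pyRange_one_succ_right (by omega)
      have hcast : ((k + 1 : Nat) : Int) = (k : Int) + 1 := by push_cast; ring
      rw [hcast, hr, List.foldl_append, ih hk1 (le_of_lt hklen)]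
      have hdrop : wt.drop k = wt[k]'hklen :: wt.drop (k + 1) := List.drop_eq_getElem_cons hklen
      have hlenS : ((wt.take k).foldl (fun a t => PySem.List.insertBy pvBf t a) []).length = k := by
        rw [length_foldl_insertBy]; simp [List.length_take]; omega
      have hpw : ((wt.take k).foldl (fun a t => PySem.List.insertBy pvBf t a) []).Pairwise pvR :=
        pairwise_foldl_insertBy _ _ (List.Pairwise.nil)
      simp only [List.foldl_cons, List.foldl_nil]
      rw [hdrop]
      have := pvInner_spec ((wt.take k).foldl (fun a t => PySem.List.insertBy pvBf t a) [])
        (wt[k]'hklen) (wt.drop (k + 1)) hpw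
      rw [hlenS] at this
      have htoNat : ((k : Int)).toNat = k := by omega
      rw [htoNat, this]
      have htake : wt.take (k + 1) = wt.take k ++ [wt[k]'hklen] := by
        rw [List.take_add_one]; simp [List.getElem?_eq_getElem hklen]
      rw [htake, List.foldl_append]
      simp

theorem foldl_append_eq_map (names : List String) (f : String → Int) :
    names.foldl (fun acc name => acc ++ [(name, f name)]) []
      = names.map (fun name => (name, f name)) := by
  have gen : ∀ (ns : List String) (acc : List (String × Int)),
      ns.foldl (fun acc name => acc ++ [(name, f name)]) acc
        = acc ++ ns.map (fun name => (name, f name)) := by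
    intro ns
    induction ns with
    | nil => simp
    | cons n ns ih => intro acc; simp [ih]
  simpa using gen names []

theorem map_fst_insertBy (f : String → Int) (x : String) (ts : List (String × Int))
    (hts : ∀ t ∈ ts, t.2 = f t.1) :
    (PySem.List.insertBy pvBf (x, f x) ts).map Prod.fst
      = PySem.List.insertBy (fun a b => pvBf (a, f a) (b, f b)) x (ts.map Prod.fst) := by
  induction ts with
  | nil => rfl
  | cons t ts ih =>
    have ht : t.2 = f t.1 := hts t (List.mem_cons_self)
    have htup : t = (t.1, f t.1) := by rw [← ht]
    simp only [PySem.List.insertBy, List.map_cons]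
    rw [show pvBf (x, f x) t = pvBf (x, f x) (t.1, f t.1) from by rw [← htup]]
    split
    · simp
    · simp only [List.map_cons, List.cons.injEq, true_and]
      exact ih (fun u hu => hts u (List.mem_cons_of_mem _ hu))

theorem map_fst_foldl_insertBy (f : String → Int) (names : List String)
    (acc : List (String × Int)) (hacc : ∀ t ∈ acc, t.2 = f t.1) :
    ((names.map (fun n => (n, f n))).foldl (fun a t => PySem.List.insertBy pvBf t a) acc).map Prod.fst
      = names.foldl (fun a n => PySem.List.insertBy (fun u v => pvBf (u, f u) (v, f v)) n a) (acc.map Prod.fst) := by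
  induction names generalizing acc with
  | nil => simp
  | cons n ns ih =>
    simp only [List.map_cons, List.foldl_cons]
    rw [ih (PySem.List.insertBy pvBf (n, f n) acc) ?_, map_fst_insertBy f n acc hacc]
    intro t ht
    rcases (PySem.List.mem_insertBy _ _ _ _).1 ht with rfl | ht
    · rfl
    · exact hacc t ht

theorem answer4_alt_eq (names : List String) :
    answer4_alt names
      = names.foldl (fun a n =>
          PySem.List.insertBy
            (fun u v => pvBf (u, pvScore pvTable u) (v, pvScore pvTable v)) n a) [] := rfl

-- ===== VERDICT (by name: the statement is the Claim_ definition above) =====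
theorem answer4_spec : Claim_equal_answer4 := by
  intro names _ _
  show answer4 names = answer4_alt names
  show ((PySem.List.pyRange 1
      ((names.foldl (fun acc name => acc ++ [(name, pvScore pvTable name)]) []).length : Int)).foldl
        (fun arr ip => pvInner arr ip.toNat)
        (names.foldl (fun acc name => acc ++ [(name, pvScore pvTable name)]) [])).map
          (fun tup => tup.1) = answer4_alt names
  rw [foldl_append_eq_map names (pvScore pvTable)]
  rcases names with _ | ⟨n, ns⟩
  · rfl
  · have hlen1 : 1 ≤ ((n :: ns).map (fun name => (name, pvScore pvTable name))).length := by
      simp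
    rw [pvOuter _ _ hlen1 (le_refl _)]
    rw [List.take_length, List.drop_length, List.append_nil]
    rw [show (fun tup : String × Int => tup.1) = Prod.fst from rfl]
    rw [map_fst_foldl_insertBy (pvScore pvTable) (n :: ns) [] (by simp)]
    rw [answer4_alt_eq]
    rfl
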